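-- pv_equiv track=rewrite | github.com/4-means/EDI_Doc_Validator | x12_validator.py | get_rcd_blocks
-- ===== SOURCE A (Python) =====
-- from typing import List, Tuple, Dict, Any, Optional
--
-- def get_rcd_blocks(tx_block: List[Dict[str, Any]]) -> List[List[Dict[str, Any]]]:
--     starts = [i for i, s in enumerate(tx_block) if s["tag"] == "RCD"]
--     if not starts:
--         return []
--     blocks = []
--     for si, start in enumerate(starts):
--         end = len(tx_block)
--         if si + 1 < len(starts):
--             end = starts[si + 1]
--         else:
--             for j in range(start + 1, len(tx_block)):
--                 if tx_block[j]["tag"] in ("CTT", "SE"):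
--                     end = j
--                     break
--         blocks.append(tx_block[start:end])
--     return blocks
-- ===== SOURCE B (Python) =====
-- def get_rcd_blocks(tx_block):
--     blocks = []
--     cur = None
--     for seg in tx_block:
--         if seg["tag"] == "RCD":
--             if cur is not None:
--                 blocks.append(cur)
--             cur = [seg]
--         elif cur is not None:
--             cur.append(seg)
--     if cur is None:
--         return []
--     for k in range(1, len(cur)):
--         if cur[k]["tag"] in ("CTT", "SE"):
--             cur = cur[:k]
--             break
--     blocks.append(cur)
--     return blocks
-- ===== Notes on version B (the rewrite author's own statement) =====
-- stated objective: alternative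
-- what changed: A first collects all RCD indices with enumerate and then slices between consecutive indices (scanning forward for CTT/SE to end the last block); B makes one streaming pass that opens a block at each RCD and accumulates segments into it, then trims only the final block at the first CTT/SE after its head.
import Mathlib
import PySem

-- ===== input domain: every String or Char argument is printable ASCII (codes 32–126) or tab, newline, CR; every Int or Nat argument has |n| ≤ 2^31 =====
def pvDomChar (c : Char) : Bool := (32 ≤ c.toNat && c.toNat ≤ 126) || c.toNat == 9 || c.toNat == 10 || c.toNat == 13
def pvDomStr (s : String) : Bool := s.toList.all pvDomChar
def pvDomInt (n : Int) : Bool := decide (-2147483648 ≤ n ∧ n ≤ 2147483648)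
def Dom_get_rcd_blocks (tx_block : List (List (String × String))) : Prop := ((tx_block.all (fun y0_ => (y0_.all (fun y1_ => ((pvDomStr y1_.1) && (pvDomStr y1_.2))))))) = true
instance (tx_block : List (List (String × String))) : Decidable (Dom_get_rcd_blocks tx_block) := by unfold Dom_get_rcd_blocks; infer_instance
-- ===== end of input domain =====

-- B replaces A's index bookkeeping (enumerate positions, slice between consecutive RCD indices, inner
-- index scan for the last block) by one streaming pass that accumulates segment blocks directly,
-- trimming only the final block at the first CTT/SE after its head; same return value (objective: alternative).

-- ===== PORT A =====
-- s["tag"]: first-match lookup in the association list; Pre_ guarantees the key exists (KeyError otherwise).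
def pvTag (s : List (String × String)) : String := (List.lookup "tag" s).getD ""
def pvIsRCD (s : List (String × String)) : Bool := pvTag s == "RCD"
def pvIsStop (s : List (String × String)) : Bool := pvTag s == "CTT" || pvTag s == "SE"

def get_rcd_blocks (tx_block : List (List (String × String))) : List (List (List (String × String))) :=
  let starts : List Int :=
    ((PySem.List.enumerate tx_block).filter (fun p => pvIsRCD p.2)).map (·.1)
  if starts = [] then []
  else
    (PySem.List.enumerate starts).foldl
      (fun blocks p =>
        blocks ++ [PySem.List.slice tx_block (some p.2) (some (
          if p.1 + 1 < (starts.length : Int) then PySem.List.pyGetD starts (p.1 + 1) 0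
          else
            -- 'for j in range(start+1, len(tx_block)): if …: end = j; break' = first hit, else len
            match (PySem.List.pyRange (p.2 + 1) (tx_block.length : Int) 1).find?
                (fun j => pvIsStop (PySem.List.pyGetD tx_block j [])) with
            | some j => j
            | none => (tx_block.length : Int)))]) []

-- ===== PORT B =====
def pvStepB (st : List (List (List (String × String))) × Option (List (List (String × String))))
    (seg : List (String × String)) :
    List (List (List (String × String))) × Option (List (List (String × String))) :=
  if pvIsRCD seg then
    (match st.2 with
     | some c => st.1 ++ [c]
     | none => st.1, some [seg])
  else
    match st.2 with
    | some c => (st.1, some (c ++ [seg]))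
    | none => st

def get_rcd_blocks_alt (tx_block : List (List (String × String))) : List (List (List (String × String))) :=
  let st := tx_block.foldl pvStepB ([], none)
  match st.2 with
  | none => []
  | some cur =>
    st.1 ++ [
      -- 'for k in range(1, len(cur)): if …: cur = cur[:k]; break'
      match (PySem.List.pyRange 1 (cur.length : Int) 1).find?
          (fun k => pvIsStop (PySem.List.pyGetD cur k [])) with
      | some k => PySem.List.slice cur none (some k)
      | none => cur]

-- ===== PRECONDITION & SPEC =====
-- Pre_ excludes exactly the inputs where the Python raises KeyError: a segment without a "tag" key.
def Pre_get_rcd_blocks (tx_block : List (List (String × String))) : Prop :=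
  ∀ s ∈ tx_block, (List.lookup "tag" s).isSome = true
instance (tx_block : List (List (String × String))) : Decidable (Pre_get_rcd_blocks tx_block) := by
  unfold Pre_get_rcd_blocks; infer_instance

def pvWitness_get_rcd_blocks : (List (List (String × String))) :=
  [[("tag", "RCD")], [("tag", "N1")], [("tag", "SE")]]

def Spec_get_rcd_blocks (tx_block : List (List (String × String))) (out : List (List (List (String × String)))) : Prop := out = get_rcd_blocks_alt tx_block
instance (tx_block : List (List (String × String))) (out : List (List (List (String × String)))) : Decidable (Spec_get_rcd_blocks tx_block out) := by unfold Spec_get_rcd_blocks; infer_instance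

-- ===== CLAIM (what is proved, stated in full; the proofs are below) =====
def Claim_equal_get_rcd_blocks : Prop := ∀ (tx_block : List (List (String × String))), Dom_get_rcd_blocks tx_block → Pre_get_rcd_blocks tx_block → Spec_get_rcd_blocks tx_block (get_rcd_blocks tx_block)

-- ===== LEMMAS AND PROOFS =====

-- the reference function: blocks split at RCD, last block trimmed at first CTT/SE after its head
def trimT (b : List (List (String × String))) : List (List (String × String)) :=
  match b with
  | [] => []
  | h :: t => h :: t.takeWhile (fun s => !pvIsStop s)

def buildT (c : List (List (String × String))) (tx : List (List (String × String))) :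
    List (List (List (String × String))) :=
  match h : tx.dropWhile (fun s => !pvIsRCD s) with
  | [] => [trimT (c ++ tx.takeWhile (fun s => !pvIsRCD s))]
  | r :: tail => (c ++ tx.takeWhile (fun s => !pvIsRCD s)) :: buildT [r] tail
termination_by tx.length
decreasing_by
  have hle := List.length_dropWhile_le (p := fun s => !pvIsRCD s) (l := tx)
  rw [h] at hle
  simp at hle ⊢
  omega

-- find over range(a, len) with default len, as a + takeWhile length
theorem pvFindEnd {α : Type} (xs : List α) (d : α) (q : α → Bool) (a : Nat) (ha : a ≤ xs.length) :
    (match (PySem.List.pyRange (a : Int) (xs.length : Int) 1).find? (fun j => q (PySem.List.pyGetD xs j d)) with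
     | some j => j
     | none => (xs.length : Int))
    = (((a + ((xs.drop a).takeWhile (fun x => !q x)).length : Nat) : Int)) := by
  induction hn : xs.length - a generalizing a with
  | zero =>
    have haa : a = xs.length := by omega
    subst haa
    rw [PySem.List.pyRange_one_eq_nil (by omega)]
    simp
  | succ n ih =>
    have hlt : a < xs.length := by omega
    rw [PySem.List.pyRange_one_cons (by exact_mod_cast hlt)]
    rw [List.find?_cons]
    have hget : PySem.List.pyGetD xs (a : Int) d = xs[a] := by
      rw [PySem.List.pyGetD_natCast, List.getD_eq_getElem _ _ hlt]
    rw [List.drop_eq_getElem_cons hlt]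
    by_cases hq : q xs[a]
    · simp [hget, hq]
    · have hq' : q xs[a] = false := by simp [hq]
      rw [hget, hq']
      simp only [List.takeWhile_cons, hq', Bool.not_false]
      rw [show ((a : Int) + 1) = (((a + 1 : Nat)) : Int) by push_cast; ring]
      rw [ih (a + 1) (by omega) (by omega)]
      simp
      omega

theorem take_takeWhile_len {α : Type} (l : List α) (p : α → Bool) :
    l.take (l.takeWhile p).length = l.takeWhile p :=
  (List.prefix_iff_eq_take.mp (List.takeWhile_prefix p)).symm

-- the port's trim of the final block equals trimT
theorem trimPort (cur : List (List (String × String))) :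
    (match (PySem.List.pyRange 1 (cur.length : Int) 1).find?
        (fun k => pvIsStop (PySem.List.pyGetD cur k [])) with
     | some k => PySem.List.slice cur none (some k)
     | none => cur) = trimT cur := by
  cases cur with
  | nil =>
    rw [PySem.List.pyRange_one_eq_nil (by simp)]
    simp [trimT]
  | cons h t =>
    have hfe := pvFindEnd (h :: t) [] pvIsStop 1 (by simp)
    push_cast at hfe
    simp only [List.drop_succ_cons, List.drop_zero] at hfe
    cases hfind : List.find? (fun k => pvIsStop (PySem.List.pyGetD (h :: t) k []))
        (PySem.List.pyRange 1 ((h :: t).length : Int) 1) with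
    | none =>
      rw [hfind] at hfe
      have hfe2 : (((h :: t).length : Nat) : Int)
          = ((1 + (List.takeWhile (fun x => !pvIsStop x) t).length : Nat) : Int) := hfe
      show (h :: t) = trimT (h :: t)
      have hlen : (List.takeWhile (fun x => !pvIsStop x) t).length = t.length := by
        simp only [List.length_cons] at hfe2
        omega
      have : List.takeWhile (fun x => !pvIsStop x) t = t := by
        have h2 := take_takeWhile_len t (fun x => !pvIsStop x)
        rw [hlen, List.take_length] at h2
        exact h2.symm
      simp [trimT, this]
    | some k =>
      rw [hfind] at hfe
      have hfe2 : k = ((1 + (List.takeWhile (fun x => !pvIsStop x) t).length : Nat) : Int) := hfe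
      show PySem.List.slice (h :: t) none (some k) = trimT (h :: t)
      have hk0 : (0 : Int) ≤ k := by omega
      rw [PySem.List.slice_to _ hk0]
      have hkt : k.toNat = (List.takeWhile (fun x => !pvIsStop x) t).length + 1 := by omega
      rw [hkt, List.take_succ_cons, take_takeWhile_len, trimT]

-- ---- B side ----
def finish2 (st : List (List (List (String × String))) × Option (List (List (String × String)))) :
    List (List (List (String × String))) :=
  match st.2 with
  | none => []
  | some cur => st.1 ++ [trimT cur]

theorem buildT_eq_nil (c tx : List (List (String × String)))
    (h : tx.dropWhile (fun s => !pvIsRCD s) = []) :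
    buildT c tx = [trimT (c ++ tx.takeWhile (fun s => !pvIsRCD s))] := by
  rw [buildT]
  split
  · rfl
  · rename_i heq
    rw [h] at heq
    cases heq

theorem buildT_eq_cons (c tx : List (List (String × String)))
    (r : List (String × String)) (tail : List (List (String × String)))
    (h : tx.dropWhile (fun s => !pvIsRCD s) = r :: tail) :
    buildT c tx = (c ++ tx.takeWhile (fun s => !pvIsRCD s)) :: buildT [r] tail := by
  rw [buildT]
  split
  · rename_i heq
    rw [h] at heq
    cases heq
  · rename_i r' tail' heq
    rw [h] at heq
    cases heq
    rfl

theorem buildT_shift (c tx : List (List (String × String))) (s : List (String × String))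
    (hs : pvIsRCD s = false) : buildT c (s :: tx) = buildT (c ++ [s]) tx := by
  have hdw : (s :: tx).dropWhile (fun x => !pvIsRCD x) = tx.dropWhile (fun x => !pvIsRCD x) := by
    simp [List.dropWhile_cons, hs]
  have htw : (s :: tx).takeWhile (fun x => !pvIsRCD x) = s :: tx.takeWhile (fun x => !pvIsRCD x) := by
    simp [List.takeWhile_cons, hs]
  cases hd : tx.dropWhile (fun x => !pvIsRCD x) with
  | nil =>
    rw [buildT_eq_nil _ _ (by rw [hdw, hd]), buildT_eq_nil _ _ hd, htw]
    simp
  | cons r tail =>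
    rw [buildT_eq_cons _ _ _ _ (by rw [hdw, hd]), buildT_eq_cons _ _ _ _ hd, htw]
    simp

theorem foldlB_none (tx : List (List (String × String))) :
    tx.foldl pvStepB ([], none)
    = (match tx.dropWhile (fun s => !pvIsRCD s) with
       | [] => (([], none) : List (List (List (String × String))) × Option (List (List (String × String))))
       | r :: tail => tail.foldl pvStepB ([], some [r])) := by
  induction tx with
  | nil => simp
  | cons s tx ih =>
    by_cases hr : pvIsRCD s
    · simp [List.foldl_cons, pvStepB, hr]
    · simp only [List.foldl_cons, pvStepB, hr, if_neg, Bool.false_eq_true, not_false_eq_true,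
        List.dropWhile_cons]
      simpa [hr] using ih

theorem foldlB_some (tx : List (List (String × String))) :
    ∀ (blocks : List (List (List (String × String)))) (c : List (List (String × String))),
    finish2 (tx.foldl pvStepB (blocks, some c)) = blocks ++ buildT c tx := by
  induction tx with
  | nil =>
    intro blocks c
    rw [buildT_eq_nil _ _ (by simp)]
    simp [finish2]
  | cons s tx ih =>
    intro blocks c
    by_cases hr : pvIsRCD s
    · have hstep : pvStepB (blocks, some c) s = (blocks ++ [c], some [s]) := by
        simp [pvStepB, hr]
      rw [List.foldl_cons, hstep, ih]
      rw [buildT_eq_cons c (s :: tx) s tx (by simp [hr])]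
      simp [hr]
    · have hr' : pvIsRCD s = false := by simp [hr]
      have hstep : pvStepB (blocks, some c) s = (blocks, some (c ++ [s])) := by
        simp [pvStepB, hr']
      rw [List.foldl_cons, hstep, ih, buildT_shift c tx s hr']

-- ---- A side ----
def Sf (b : Int) (tx : List (List (String × String))) : List Int :=
  ((PySem.List.enumerate tx b).filter (fun p => pvIsRCD p.2)).map (·.1)

def chainA (full : List (List (String × String))) : List Int → List (List (List (String × String)))
  | [] => []
  | [s] => [PySem.List.slice full (some s) (some (
      match (PySem.List.pyRange (s + 1) (full.length : Int) 1).find?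
          (fun j => pvIsStop (PySem.List.pyGetD full j [])) with
      | some j => j
      | none => (full.length : Int)))]
  | s1 :: s2 :: ss => PySem.List.slice full (some s1) (some s2) :: chainA full (s2 :: ss)

theorem Sf_nil (b : Int) : Sf b [] = [] := by simp [Sf, PySem.List.enumerate_nil]

theorem Sf_cons (b : Int) (s : List (String × String)) (tx : List (List (String × String))) :
    Sf b (s :: tx) = if pvIsRCD s then b :: Sf (b + 1) tx else Sf (b + 1) tx := by
  simp only [Sf, PySem.List.enumerate_cons, List.filter_cons]
  split <;> simp_all

theorem Sf_eq_nil (b : Int) (tx : List (List (String × String)))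
    (h : ∀ x ∈ tx, pvIsRCD x = false) : Sf b tx = [] := by
  induction tx generalizing b with
  | nil => exact Sf_nil b
  | cons s tx ih =>
    rw [Sf_cons, h s (by simp), if_neg (by simp)]
    exact ih _ (fun x hx => h x (by simp [hx]))

theorem Sf_append_none (p tx : List (List (String × String))) (b : Int)
    (h : ∀ x ∈ p, pvIsRCD x = false) : Sf b (p ++ tx) = Sf (b + p.length) tx := by
  induction p generalizing b with
  | nil => simp
  | cons s p ih =>
    rw [List.cons_append, Sf_cons, h s (by simp), if_neg (by simp),
      ih _ (fun x hx => h x (by simp [hx]))]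
    congr 1
    simp
    omega

theorem foldlA (tx : List (List (String × String))) (S : List Int) :
    ∀ (k : Nat) (acc : List (List (List (String × String)))),
    (PySem.List.enumerate (S.drop k) (k : Int)).foldl
      (fun blocks p =>
        blocks ++ [PySem.List.slice tx (some p.2) (some (
          if p.1 + 1 < (S.length : Int) then PySem.List.pyGetD S (p.1 + 1) 0
          else
            match (PySem.List.pyRange (p.2 + 1) (tx.length : Int) 1).find?
                (fun j => pvIsStop (PySem.List.pyGetD tx j [])) with
            | some j => j
            | none => (tx.length : Int)))]) acc
    = acc ++ chainA tx (S.drop k) := by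
  intro k acc
  induction hn : S.length - k generalizing k acc with
  | zero =>
    rw [List.drop_eq_nil_of_le (by omega)]
    simp [PySem.List.enumerate_nil, chainA]
  | succ n ih =>
    have hk : k < S.length := by omega
    rw [List.drop_eq_getElem_cons hk, PySem.List.enumerate_cons]
    simp only [List.foldl_cons]
    have hc : (k : Int) + 1 = (((k + 1 : Nat)) : Int) := by push_cast; ring_nf
    by_cases hlt : k + 1 < S.length
    · rw [if_pos (by exact_mod_cast hlt)]
      rw [hc, ih (k + 1) _ (by omega)]
      rw [PySem.List.pyGetD_natCast, List.getD_eq_getElem _ _ hlt]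
      rw [List.drop_eq_getElem_cons hlt]
      simp [chainA]
    · rw [if_neg (by omega)]
      rw [hc, List.drop_eq_nil_of_le (by omega)]
      simp [PySem.List.enumerate_nil, chainA]

theorem head_dropWhile_false {α : Type} (p : α → Bool) :
    ∀ (l : List α) (r : α) (tail : List α), l.dropWhile p = r :: tail → p r = false := by
  intro l
  induction l with
  | nil => intro r tail h; cases h
  | cons x xs ih =>
    intro r tail h
    by_cases hx : p x
    · rw [List.dropWhile_cons_of_pos hx] at h
      exact ih r tail h
    · rw [List.dropWhile_cons_of_neg hx] at h
      cases h
      simpa using hx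

theorem chain_build (full : List (List (String × String))) :
    ∀ (n : Nat) (tx : List (List (String × String))) (a : Nat) (s : List (String × String)),
    tx.length = n → full.drop a = s :: tx → pvIsRCD s = true →
    chainA full ((a : Int) :: Sf ((a : Int) + 1) tx) = buildT [s] tx := by
  intro n
  induction n using Nat.strong_induction_on with
  | _ n ih =>
  intro tx a s hlen h hs
  have hfl := congrArg List.length h
  simp [List.length_drop] at hfl
  have ha : a < full.length := by omega
  have hdrop1 : full.drop (a + 1) = tx := by
    have : full.drop (a + 1) = (full.drop a).drop 1 := by
      rw [List.drop_drop]
    rw [this, h]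
    simp
  cases hd : tx.dropWhile (fun x => !pvIsRCD x) with
  | nil =>
    have hall : ∀ x ∈ tx, pvIsRCD x = false := by
      have h2 := List.dropWhile_eq_nil_iff.mp hd
      intro x hx
      simpa using h2 x hx
    rw [Sf_eq_nil _ _ hall]
    have hfe := pvFindEnd full [] pvIsStop (a + 1) (by omega)
    rw [hdrop1] at hfe
    have hc : ((a : Int) + 1) = (((a + 1 : Nat)) : Int) := by push_cast; ring
    simp only [chainA, hc, hfe]
    rw [buildT_eq_nil _ _ hd]
    have htwA : List.takeWhile (fun s => !pvIsRCD s) tx = tx :=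
      List.takeWhile_eq_self_iff.mpr (fun x hx => by simp [hall x hx])
    rw [htwA]
    have hcc : (((a + 1 + (List.takeWhile (fun x => !pvIsStop x) tx).length : Nat)) : Int)
        = (a : Int) + (((1 + (List.takeWhile (fun x => !pvIsStop x) tx).length : Nat)) : Int) := by
      push_cast; ring
    rw [hcc, PySem.List.slice_natCast_add, h]
    rw [Nat.add_comm 1, List.take_succ_cons, take_takeWhile_len]
    rfl
  | cons r tail =>
    have htx : tx = tx.takeWhile (fun x => !pvIsRCD x) ++ r :: tail := by
      conv_lhs => rw [← List.takeWhile_append_dropWhile (p := fun x => !pvIsRCD x) (l := tx)]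
      rw [hd]
    have hallp : ∀ x ∈ tx.takeWhile (fun x => !pvIsRCD x), pvIsRCD x = false := by
      intro x hx
      simpa using List.mem_takeWhile_imp hx
    have hr : pvIsRCD r = true := by
      have := head_dropWhile_false _ tx r tail hd
      simpa using this
    set pT := tx.takeWhile (fun x => !pvIsRCD x) with hpT
    have hSf : Sf ((a : Int) + 1) tx
        = (((a + 1 + pT.length : Nat)) : Int) :: Sf ((((a + 1 + pT.length : Nat)) : Int) + 1) tail := by
      conv_lhs => rw [htx]
      rw [Sf_append_none _ _ _ hallp, Sf_cons, if_pos hr]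
      congr 1 <;> push_cast <;> ring_nf
    rw [hSf]
    simp only [chainA]
    have hdropm : full.drop (a + 1 + pT.length) = r :: tail := by
      have h1 : full.drop (a + 1 + pT.length) = (full.drop (a + 1)).drop pT.length := by
        rw [List.drop_drop]
      rw [h1, hdrop1]
      conv_lhs => rw [htx]
      simp
    have hihlen : tail.length < n := by
      have := congrArg List.length htx
      simp at this
      omega
    rw [ih tail.length hihlen tail (a + 1 + pT.length) r rfl hdropm hr]
    rw [buildT_eq_cons [s] tx r tail hd]
    have hslice : PySem.List.slice full (some (a : Int)) (some (((a + 1 + pT.length : Nat)) : Int))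
        = s :: pT := by
      have hcc : (((a + 1 + pT.length : Nat)) : Int)
          = (a : Int) + (((1 + pT.length : Nat)) : Int) := by
        push_cast; ring
      rw [hcc, PySem.List.slice_natCast_add, h, Nat.add_comm 1, List.take_succ_cons]
      congr 1
      conv_lhs => rw [htx]
      simp
    rw [hslice]
    rfl

theorem altB_eq_finish2 (tx : List (List (String × String))) :
    get_rcd_blocks_alt tx = finish2 (tx.foldl pvStepB ([], none)) := by
  simp only [get_rcd_blocks_alt, finish2]
  cases hst : (tx.foldl pvStepB ([], none)).2 with
  | none => rfl
  | some cur =>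
    exact congrArg (fun z => (tx.foldl pvStepB ([], none)).1 ++ [z]) (trimPort cur)

theorem altB_eq_buildT (tx : List (List (String × String))) :
    get_rcd_blocks_alt tx
    = (match tx.dropWhile (fun s => !pvIsRCD s) with
       | [] => []
       | r :: tail => buildT [r] tail) := by
  rw [altB_eq_finish2, foldlB_none]
  cases hd : tx.dropWhile (fun s => !pvIsRCD s) with
  | nil => rfl
  | cons r tail =>
    simp only
    rw [foldlB_some tail [] [r]]
    simp

theorem portA_eq_chain (tx : List (List (String × String))) :
    get_rcd_blocks tx = (if Sf 0 tx = [] then [] else chainA tx (Sf 0 tx)) := by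
  have hS : Sf 0 tx
      = ((PySem.List.enumerate tx).filter (fun p => pvIsRCD p.2)).map (·.1) := rfl
  unfold get_rcd_blocks
  rw [← hS]
  by_cases hnil : Sf 0 tx = []
  · rw [if_pos hnil, if_pos hnil]
  · rw [if_neg hnil, if_neg hnil]
    have hfa := foldlA tx (Sf 0 tx) 0 []
    simpa using hfa

theorem main_eq (tx : List (List (String × String))) :
    get_rcd_blocks tx = get_rcd_blocks_alt tx := by
  rw [portA_eq_chain, altB_eq_buildT]
  cases hd : tx.dropWhile (fun s => !pvIsRCD s) with
  | nil =>
    have hall : ∀ x ∈ tx, pvIsRCD x = false := by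
      have h2 := List.dropWhile_eq_nil_iff.mp hd
      intro x hx
      simpa using h2 x hx
    rw [if_pos (Sf_eq_nil 0 tx hall)]
  | cons r tail =>
    have htx : tx = tx.takeWhile (fun x => !pvIsRCD x) ++ r :: tail := by
      conv_lhs => rw [← List.takeWhile_append_dropWhile (p := fun x => !pvIsRCD x) (l := tx)]
      rw [hd]
    have hallp : ∀ x ∈ tx.takeWhile (fun x => !pvIsRCD x), pvIsRCD x = false := by
      intro x hx
      simpa using List.mem_takeWhile_imp hx
    have hr : pvIsRCD r = true := by
      have := head_dropWhile_false _ tx r tail hd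
      simpa using this
    set pT := tx.takeWhile (fun x => !pvIsRCD x) with hpT
    have hSf : Sf 0 tx = ((pT.length : Nat) : Int) :: Sf (((pT.length : Nat) : Int) + 1) tail := by
      conv_lhs => rw [htx]
      rw [Sf_append_none _ _ _ hallp, Sf_cons, if_pos hr]
      congr 1 <;> push_cast <;> ring_nf
    have hdropm : tx.drop pT.length = r :: tail := by
      conv_lhs => rw [htx]
      simp
    rw [hSf, if_neg (by simp)]
    exact chain_build tx tail.length tail pT.length r rfl hdropm hr

-- ===== VERDICT (by name: the statement is the Claim_ definition above) =====
theorem get_rcd_blocks_spec : Claim_equal_get_rcd_blocks := by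
  intro tx _ _
  unfold Spec_get_rcd_blocks
  exact main_eq tx
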